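-- pv_equiv track=rewrite | github.com/horw/discord-driven-action | main.py | get_kw_sizes
-- ===== SOURCE A (Python) =====
-- def get_kw_sizes(skw):
--     skw = skw.split('SS:')
--     skw = [i.strip(' ').lower() for i in skw]
--     if len(skw) == 2:
--         return skw[0], skw[1]
--     if len(skw) == 1:
--         return skw[0], None
--     return None, None
-- ===== SOURCE B (Python) =====
-- def get_kw_sizes(skw):
--     first = None
--     cur = []
--     i = 0
--     n = len(skw)
--     while i < n:
--         if skw.startswith('SS:', i):
--             if first is not None:
--                 return None, None
--             first = cur
--             cur = []
--             i += 3
--         else: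
--             cur.append(skw[i])
--             i += 1
--     if first is None:
--         return ''.join(cur).strip(' ').lower(), None
--     return ''.join(first).strip(' ').lower(), ''.join(cur).strip(' ').lower()
-- ===== Notes on version B (the rewrite author's own statement) =====
-- stated objective: alternative
-- what changed: B replaces A's split-into-a-list-then-branch-on-its-length by a single left-to-right character scan with an accumulator state machine: it collects the part before and after the first delimiter while scanning and exits early with (None, None) as soon as a second delimiter is seen, never building a split list.
import Mathlib
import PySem

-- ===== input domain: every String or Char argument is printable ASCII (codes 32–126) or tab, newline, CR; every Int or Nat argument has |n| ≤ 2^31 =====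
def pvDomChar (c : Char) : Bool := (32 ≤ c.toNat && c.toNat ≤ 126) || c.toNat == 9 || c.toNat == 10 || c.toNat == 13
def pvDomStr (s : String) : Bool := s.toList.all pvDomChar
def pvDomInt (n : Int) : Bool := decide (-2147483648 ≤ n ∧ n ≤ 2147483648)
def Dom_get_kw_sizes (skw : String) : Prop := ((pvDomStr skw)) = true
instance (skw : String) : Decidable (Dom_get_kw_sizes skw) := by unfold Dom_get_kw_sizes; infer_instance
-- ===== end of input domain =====

-- B replaces A's split-into-a-list-then-branch by a single character scan with an
-- accumulator state machine (early exit at a second delimiter); objective: alternative.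

-- ===== PORT A =====
def get_kw_sizes (skw : String) : Option String × Option String :=
  let parts := (PySem.Str.split? skw "SS:").getD []
  let parts := parts.map (fun i => PySem.Str.lower (PySem.Str.stripChars i " "))
  if parts.length = 2 then (PySem.List.pyGet? parts 0, PySem.List.pyGet? parts 1)
  else if parts.length = 1 then (PySem.List.pyGet? parts 0, none)
  else (none, none)

-- ===== PORT B =====
-- ''.join(chars).strip(' ').lower()
def bNorm (cs : List Char) : String :=
  PySem.Str.lower (PySem.Str.stripChars (String.ofList cs) " ")

-- the while loop of Source B: scan the remaining characters, `cur` is the list being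
-- appended to, `first` the part saved at the first 'SS:' (none = not seen yet);
-- startswith('SS:', i) is the isPrefixOf test on the remaining characters.
def bScan : List Char → List Char → Option (List Char) → Option String × Option String
  | [], cur, none => (some (bNorm cur), none)
  | [], cur, some a => (some (bNorm a), some (bNorm cur))
  | c :: t, cur, first =>
    if (['S','S',':'] : List Char).isPrefixOf (c :: t) then
      match first with
      | some _ => (none, none)
      | none => bScan (t.drop 2) [] (some cur)
    else bScan t (cur ++ [c]) first
termination_by l _ _ => l.length
decreasing_by all_goals simp [List.length_drop]

def get_kw_sizes_alt (skw : String) : Option String × Option String :=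
  bScan skw.toList [] none

-- ===== PRECONDITION & SPEC =====
def Spec_get_kw_sizes (skw : String) (out : Option String × Option String) : Prop := out = get_kw_sizes_alt skw
instance (skw : String) (out : Option String × Option String) : Decidable (Spec_get_kw_sizes skw out) := by unfold Spec_get_kw_sizes; infer_instance

-- ===== CLAIM (what is proved, stated in full; the proofs are below) =====
def Claim_equal_get_kw_sizes : Prop := ∀ (skw : String), Dom_get_kw_sizes skw → Spec_get_kw_sizes skw (get_kw_sizes skw)

-- ===== LEMMAS AND PROOFS =====
theorem find_go_ge (sub : List Char) : ∀ (l : List Char) (k : ℕ), -1 ≤ PySem.Chars.find.go sub l k := by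
  intro l
  induction l with
  | nil => intro k; simp [PySem.Chars.find.go]; split <;> omega
  | cons c t ih =>
    intro k
    rw [PySem.Chars.find.go]
    split
    · omega
    · exact ih (k+1)
theorem find_ge (l sub : List Char) : -1 ≤ PySem.Chars.find l sub := find_go_ge sub l 0
theorem find_go_shift (sub : List Char) (hsub : sub ≠ []) :
    ∀ (l : List Char) (k : ℕ),
      PySem.Chars.find.go sub l k =
        if PySem.Chars.find.go sub l 0 = -1 then -1 else PySem.Chars.find.go sub l 0 + k := by
  intro l
  induction l with
  | nil =>
    intro k
    simp [PySem.Chars.find.go, List.isEmpty_iff, hsub]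
  | cons c t ih =>
    intro k
    rw [PySem.Chars.find.go]
    conv_rhs => rw [PySem.Chars.find.go]
    split
    · simp
    · rw [ih (k+1), ih 1]
      have := find_go_ge sub t 0
      split
      · simp
      · omega
theorem find_of_prefix (sub l : List Char) (h : sub.isPrefixOf l = true) :
    PySem.Chars.find l sub = 0 := by
  cases l with
  | nil =>
    have : sub = [] := by simpa [List.isPrefixOf_iff_prefix] using h
    simp [PySem.Chars.find, PySem.Chars.find.go, this]
  | cons c t =>
    rw [PySem.Chars.find, PySem.Chars.find.go]
    simp [h]
theorem find_nil (sub : List Char) (hsub : sub ≠ []) : PySem.Chars.find [] sub = -1 := by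
  simp [PySem.Chars.find, PySem.Chars.find.go, List.isEmpty_iff, hsub]
theorem find_cons (sub : List Char) (hsub : sub ≠ []) (c : Char) (t : List Char)
    (h : ¬ sub.isPrefixOf (c :: t) = true) :
    PySem.Chars.find (c :: t) sub =
      if PySem.Chars.find t sub = -1 then -1 else PySem.Chars.find t sub + 1 := by
  rw [PySem.Chars.find, PySem.Chars.find.go]
  simp only [h]
  rw [find_go_shift sub hsub t 1]
  rfl

theorem go_no_occ (sep : List Char) (hsep : sep ≠ []) :
    ∀ (fuel : ℕ) (l cur : List Char) (accs : List (List Char)),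
      l.length < fuel → PySem.Chars.find l sep = -1 →
      PySem.Chars.splitOn.go sep fuel l cur accs = accs.reverse ++ [cur.reverse ++ l] := by
  intro fuel
  induction fuel with
  | zero => intro l cur accs h; omega
  | succ f ih =>
    intro l cur accs hlen hfind
    cases l with
    | nil =>
      rw [PySem.Chars.splitOn.go]
      · simp
      · omega
    | cons c t =>
      have hp : ¬ sep.isPrefixOf (c :: t) = true := by
        intro h
        rw [find_of_prefix sep _ h] at hfind
        omega
      rw [PySem.Chars.splitOn.go]
      simp only [hp]
      have ht : PySem.Chars.find t sep = -1 := by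
        rw [find_cons sep hsep c t hp] at hfind
        have := find_ge t sep
        split at hfind <;> omega
      rw [ih t (c :: cur) accs (by simpa using Nat.lt_of_succ_lt_succ hlen) ht]
      simp

theorem go_fuel (sep : List Char) (hsep : sep ≠ []) :
    ∀ (n fuel fuel' : ℕ) (l cur : List Char) (accs : List (List Char)),
      l.length ≤ n → l.length < fuel → l.length < fuel' →
      PySem.Chars.splitOn.go sep fuel l cur accs = PySem.Chars.splitOn.go sep fuel' l cur accs := by
  intro n
  induction n with
  | zero =>
    intro fuel fuel' l cur accs hn hf hf'
    have : l = [] := by cases l <;> simp_all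
    subst this
    obtain ⟨f1, rfl⟩ : ∃ f1, fuel = f1 + 1 := ⟨fuel - 1, by omega⟩
    obtain ⟨f2, rfl⟩ : ∃ f2, fuel' = f2 + 1 := ⟨fuel' - 1, by omega⟩
    rw [PySem.Chars.splitOn.go, PySem.Chars.splitOn.go] <;> omega
  | succ m ih =>
    intro fuel fuel' l cur accs hn hf hf'
    cases l with
    | nil =>
      obtain ⟨f1, rfl⟩ : ∃ f1, fuel = f1 + 1 := ⟨fuel - 1, by omega⟩
      obtain ⟨f2, rfl⟩ : ∃ f2, fuel' = f2 + 1 := ⟨fuel' - 1, by omega⟩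
      rw [PySem.Chars.splitOn.go, PySem.Chars.splitOn.go] <;> omega
    | cons c t =>
      obtain ⟨f1, rfl⟩ : ∃ f1, fuel = f1 + 1 := ⟨fuel - 1, by omega⟩
      obtain ⟨f2, rfl⟩ : ∃ f2, fuel' = f2 + 1 := ⟨fuel' - 1, by omega⟩
      rw [PySem.Chars.splitOn.go, PySem.Chars.splitOn.go]
      split
      · have h1 : 1 ≤ sep.length := by cases sep <;> simp_all
        apply ih <;> simp only [List.length_drop, List.length_cons] at * <;> omega
      · apply ih <;> simp only [List.length_cons] at * <;> omega

theorem go_occ (sep : List Char) (hsep : sep ≠ []) :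
    ∀ (n : ℕ) (l : List Char), l.length ≤ n → 0 ≤ PySem.Chars.find l sep →
    ∀ (fuel : ℕ) (cur : List Char) (accs : List (List Char)), l.length < fuel →
      PySem.Chars.splitOn.go sep fuel l cur accs =
        PySem.Chars.splitOn.go sep fuel (l.drop ((PySem.Chars.find l sep).toNat + sep.length)) []
          ((cur.reverse ++ l.take (PySem.Chars.find l sep).toNat) :: accs) := by
  intro n
  induction n with
  | zero =>
    intro l hn hge
    have : l = [] := by cases l <;> simp_all
    subst this
    rw [PySem.Chars.find, PySem.Chars.find.go] at hge
    simp [List.isEmpty_iff, hsep] at hge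
  | succ m ih =>
    intro l hn hge fuel cur accs hf
    cases l with
    | nil =>
      rw [PySem.Chars.find, PySem.Chars.find.go] at hge
      simp [List.isEmpty_iff, hsep] at hge
    | cons c t =>
      obtain ⟨f1, rfl⟩ : ∃ f1, fuel = f1 + 1 := ⟨fuel - 1, by omega⟩
      by_cases hp : sep.isPrefixOf (c :: t) = true
      · rw [find_of_prefix sep _ hp]
        simp only [Int.toNat_zero, Nat.zero_add, List.take_zero, List.append_nil]
        conv_lhs => rw [PySem.Chars.splitOn.go]
        simp only [hp, if_true]
        have hd : (List.drop sep.length (c :: t)).length < f1 := by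
          have h1 : 1 ≤ sep.length := by cases sep <;> simp_all
          simp only [List.length_drop, List.length_cons] at *
          omega
        rw [go_fuel sep hsep (List.drop sep.length (c :: t)).length f1 (f1+1) _ _ _ le_rfl hd (by omega)]
      · have hfc := find_cons sep hsep c t hp
        have hge' : 0 ≤ PySem.Chars.find t sep := by
          have := find_ge t sep
          rw [hfc] at hge
          split at hge <;> omega
        have hval : PySem.Chars.find (c :: t) sep = PySem.Chars.find t sep + 1 := by
          rw [hfc]; split <;> omega
        conv_lhs => rw [PySem.Chars.splitOn.go]
        simp only [hp, Bool.false_eq_true, if_false]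
        rw [ih t (by simp at hn; omega) hge' f1 (c :: cur) accs (by simp at hf; omega)]
        rw [hval]
        have htn : (PySem.Chars.find t sep + 1).toNat = (PySem.Chars.find t sep).toNat + 1 := by omega
        rw [htn]
        simp only [List.take_succ_cons, List.reverse_cons, List.append_assoc,
          List.cons_append, List.nil_append]
        rw [go_fuel sep hsep (List.drop ((PySem.Chars.find t sep).toNat + sep.length) t).length f1 (f1+1) _ _ _ le_rfl
          (by simp only [List.length_drop]; simp at hf; omega) (by simp only [List.length_drop]; simp at hf; omega)]
        have harith : (PySem.Chars.find t sep).toNat + 1 + sep.length = ((PySem.Chars.find t sep).toNat + sep.length) + 1 := by omega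
        rw [harith, List.drop_succ_cons]

theorem go_len (sep : List Char) (hsep : sep ≠ []) :
    ∀ (fuel : ℕ) (l cur : List Char) (accs : List (List Char)),
      l.length < fuel → accs.length < (PySem.Chars.splitOn.go sep fuel l cur accs).length := by
  intro fuel
  induction fuel with
  | zero => intro l cur accs h; omega
  | succ f ih =>
    intro l cur accs hlen
    cases l with
    | nil =>
      rw [PySem.Chars.splitOn.go]
      · simp
      · omega
    | cons c t =>
      rw [PySem.Chars.splitOn.go]
      split
      · have h1 : 1 ≤ sep.length := by cases sep <;> simp_all
        have := ih (List.drop sep.length (c :: t)) [] (cur.reverse :: accs)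
          (by simp only [List.length_drop, List.length_cons] at *; omega)
        simp at this ⊢
        omega
      · exact ih t (c :: cur) accs (by simp at hlen ⊢; omega)

-- B side: the three behaviours of the scan depending on delimiter occurrences ahead
theorem bScan_no_delim : ∀ (l : List Char), PySem.Chars.find l (['S','S',':'] : List Char) = -1 →
    ∀ (cur : List Char) (first : Option (List Char)),
      bScan l cur first =
        match first with
        | none => (some (bNorm (cur ++ l)), none)
        | some a => (some (bNorm a), some (bNorm (cur ++ l))) := by
  intro l
  induction l with
  | nil => intro _ cur first; cases first <;> simp [bScan]
  | cons c t ih =>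
    intro hfind cur first
    have hp : ¬ (['S','S',':'] : List Char).isPrefixOf (c :: t) = true := by
      intro h
      rw [find_of_prefix _ _ h] at hfind
      omega
    have ht : PySem.Chars.find t (['S','S',':'] : List Char) = -1 := by
      rw [find_cons _ (by decide) c t hp] at hfind
      have := find_ge t (['S','S',':'] : List Char)
      split at hfind <;> omega
    rw [bScan.eq_def]
    simp only [hp, Bool.false_eq_true, if_false]
    rw [ih ht (cur ++ [c]) first]
    cases first <;> simp

theorem bScan_delim_some : ∀ (l : List Char), 0 ≤ PySem.Chars.find l (['S','S',':'] : List Char) →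
    ∀ (cur a : List Char), bScan l cur (some a) = (none, none) := by
  intro l
  induction l with
  | nil => intro h; rw [find_nil _ (by decide)] at h; omega
  | cons c t ih =>
    intro hfind cur a
    by_cases hp : (['S','S',':'] : List Char).isPrefixOf (c :: t) = true
    · rw [bScan.eq_def]; simp [hp]
    · have ht : 0 ≤ PySem.Chars.find t (['S','S',':'] : List Char) := by
        rw [find_cons _ (by decide) c t hp] at hfind
        have := find_ge t (['S','S',':'] : List Char)
        split at hfind <;> omega
      rw [bScan]
      simp only [hp, Bool.false_eq_true, if_false]
      exact ih ht (cur ++ [c]) a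

theorem bScan_delim_none : ∀ (l : List Char), 0 ≤ PySem.Chars.find l (['S','S',':'] : List Char) →
    ∀ (cur : List Char),
      bScan l cur none =
        bScan (l.drop ((PySem.Chars.find l (['S','S',':'] : List Char)).toNat + 3)) []
          (some (cur ++ l.take (PySem.Chars.find l (['S','S',':'] : List Char)).toNat)) := by
  intro l
  induction l with
  | nil => intro h; rw [find_nil _ (by decide)] at h; omega
  | cons c t ih =>
    intro hfind cur
    by_cases hp : (['S','S',':'] : List Char).isPrefixOf (c :: t) = true
    · rw [find_of_prefix _ _ hp]
      rw [bScan]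
      simp [hp]
    · have hfc := find_cons _ (by decide) c t hp
      have ht : 0 ≤ PySem.Chars.find t (['S','S',':'] : List Char) := by
        rw [hfc] at hfind
        have := find_ge t (['S','S',':'] : List Char)
        split at hfind <;> omega
      have hval : PySem.Chars.find (c :: t) (['S','S',':'] : List Char) =
          PySem.Chars.find t (['S','S',':'] : List Char) + 1 := by
        rw [hfc]; split <;> omega
      rw [bScan]
      simp only [hp, Bool.false_eq_true, if_false]
      rw [ih ht (cur ++ [c]), hval]
      have htn : (PySem.Chars.find t (['S','S',':'] : List Char) + 1).toNat =
          (PySem.Chars.find t (['S','S',':'] : List Char)).toNat + 1 := by omega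
      rw [htn]
      simp [List.take_succ_cons]

theorem ports_eq (skw : String) : get_kw_sizes skw = get_kw_sizes_alt skw := by
  have hsep : (['S','S',':'] : List Char) ≠ [] := by decide
  by_cases h1 : PySem.Chars.find skw.toList (['S','S',':'] : List Char) = -1
  · have hs : PySem.Chars.splitOn skw.toList (['S','S',':'] : List Char) = [skw.toList] := by
      rw [PySem.Chars.splitOn]
      rw [go_no_occ _ hsep _ _ _ _ (Nat.lt_succ_self _) h1]
      simp
    unfold get_kw_sizes get_kw_sizes_alt
    rw [bScan_no_delim skw.toList h1 [] none]
    simp only [PySem.Str.split?, PySem.Chars.split?]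
    simp [hs, bNorm, PySem.List.pyGet?, PySem.List.pyIdx?, PySem.Str.stripChars]
  · have hge : 0 ≤ PySem.Chars.find skw.toList (['S','S',':'] : List Char) := by
      have := find_ge skw.toList (['S','S',':'] : List Char); omega
    set l := skw.toList with hl
    set i := (PySem.Chars.find l (['S','S',':'] : List Char)).toNat with hi
    set t2 := l.drop (i + 3) with ht2
    have ht2len : t2.length ≤ l.length := by simp [ht2]
    have hs1 : PySem.Chars.splitOn l (['S','S',':'] : List Char) =
        PySem.Chars.splitOn.go (['S','S',':'] : List Char) (l.length + 1) t2 [] [l.take i] := by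
      rw [PySem.Chars.splitOn]
      rw [go_occ _ hsep l.length l le_rfl hge _ [] [] (Nat.lt_succ_self _)]
      simp [← hi, ← ht2]
    have hb1 : bScan l [] none = bScan t2 [] (some (l.take i)) := by
      rw [bScan_delim_none l hge []]
      simp [← hi, ← ht2]
    by_cases h2 : PySem.Chars.find t2 (['S','S',':'] : List Char) = -1
    · have hs : PySem.Chars.splitOn l (['S','S',':'] : List Char) = [l.take i, t2] := by
        rw [hs1, go_no_occ _ hsep _ _ _ _ (by omega) h2]
        simp
      unfold get_kw_sizes get_kw_sizes_alt
      rw [← hl, hb1, bScan_no_delim t2 h2 [] (some (l.take i))]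
      simp only [PySem.Str.split?, PySem.Chars.split?]
      simp [hs, bNorm, ← hl, PySem.List.pyGet?, PySem.List.pyIdx?, PySem.Str.stripChars,
        String.toList_ofList]
    · have hge2 : 0 ≤ PySem.Chars.find t2 (['S','S',':'] : List Char) := by
        have := find_ge t2 (['S','S',':'] : List Char); omega
      have hlen : 2 < (PySem.Chars.splitOn l (['S','S',':'] : List Char)).length := by
        rw [hs1]
        rw [go_occ _ hsep t2.length t2 le_rfl hge2 _ [] _ (by omega)]
        simpa using go_len (['S','S',':'] : List Char) hsep (l.length + 1)
          (t2.drop ((PySem.Chars.find t2 (['S','S',':'] : List Char)).toNat + 3)) []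
          ((t2.take (PySem.Chars.find t2 (['S','S',':'] : List Char)).toNat) :: [l.take i])
          (by simp only [List.length_drop]; omega)
      unfold get_kw_sizes get_kw_sizes_alt
      rw [← hl, hb1, bScan_delim_some t2 hge2 [] (l.take i)]
      simp only [PySem.Str.split?, PySem.Chars.split?]
      simp [← hl]
      rw [if_neg (by omega), if_neg (by omega)]

-- ===== VERDICT (by name: the statement is the Claim_ definition above) =====
theorem get_kw_sizes_spec : Claim_equal_get_kw_sizes := by
  intro skw _
  unfold Spec_get_kw_sizes
  exact ports_eq skw
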